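-- pv_equiv track=rewrite | github.com/RomanDubinin/bioinf | 1.py | frequencies_words_with_mismatches
-- ===== SOURCE A (Python) =====
-- import itertools
--
-- def kmer_mismatches(kmer, d):
--     """Returns all k-mers that are within d mismatches of the given k-mer."""
--     mismatches = [kmer]  # Initialize mismatches with the k-mer itself (i.e. d=0).
--     alt_bases = {'A':'CGT', 'C':'AGT', 'G':'ACT', 'T':'ACG'}
--     for dist in range(1, d+1):
--         for change_indices in itertools.combinations(range(len(kmer)), dist):
--             for substitutions in itertools.product(*[alt_bases[kmer[i]] for i in change_indices]):
--                 new_mistmatch = list(kmer)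
--                 for idx, sub in zip(change_indices, substitutions):
--                     new_mistmatch[idx] = sub
--                 mismatches.append(''.join(new_mistmatch))
--     return mismatches
--
-- def frequencies_words_with_mismatches(dna, k, d):
--
--     kmer_freq = {}
--
--     for i in range(0, len(dna) - k + 1):
--         k_mer = dna[i:i+k]
--         for mismatch in kmer_mismatches(k_mer, d):
--             if mismatch in kmer_freq:
--                 kmer_freq[mismatch] += 1
--             else:
--                 kmer_freq[mismatch] = 1
--
--     return kmer_freq
-- ===== SOURCE B (Python) =====
-- # Recursive per-group neighborhood generation (suffix recursion) instead of
-- # itertools.combinations/product index enumeration; same sliding-window counting.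
--
-- _ALT = {'A': 'CGT', 'C': 'AGT', 'G': 'ACT', 'T': 'ACG'}
--
--
-- def _groups(kmer, dist):
--     """Neighbors of kmer at exactly `dist` mismatches, grouped by the set of
--     changed positions (groups ordered lexicographically by that set)."""
--     if dist == 0:
--         return [[kmer]]
--     if not kmer:
--         return []
--     head, tail = kmer[0], kmer[1:]
--     res = [[b + t for b in _ALT[head] for t in g] for g in _groups(tail, dist - 1)]
--     res += [[head + t for t in g] for g in _groups(tail, dist)]
--     return res
--
--
-- def frequencies_words_with_mismatches(dna, k, d):
--     counts = {}
--     for i in range(0, len(dna) - k + 1):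
--         kmer = dna[i:i + k]
--         counts[kmer] = counts.get(kmer, 0) + 1
--         for dist in range(1, d + 1):
--             for g in _groups(kmer, dist):
--                 for m in g:
--                     counts[m] = counts.get(m, 0) + 1
--     return counts
-- ===== Notes on version B (the rewrite author's own statement) =====
-- stated objective: alternative
-- what changed: The combinations/product index-tuple enumeration of each k-mer's d-neighborhood is replaced by a structural suffix recursion that builds the neighbor groups directly on the string (no index arithmetic, shared suffix work), feeding the same sliding-window dict counting.
import Mathlib
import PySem

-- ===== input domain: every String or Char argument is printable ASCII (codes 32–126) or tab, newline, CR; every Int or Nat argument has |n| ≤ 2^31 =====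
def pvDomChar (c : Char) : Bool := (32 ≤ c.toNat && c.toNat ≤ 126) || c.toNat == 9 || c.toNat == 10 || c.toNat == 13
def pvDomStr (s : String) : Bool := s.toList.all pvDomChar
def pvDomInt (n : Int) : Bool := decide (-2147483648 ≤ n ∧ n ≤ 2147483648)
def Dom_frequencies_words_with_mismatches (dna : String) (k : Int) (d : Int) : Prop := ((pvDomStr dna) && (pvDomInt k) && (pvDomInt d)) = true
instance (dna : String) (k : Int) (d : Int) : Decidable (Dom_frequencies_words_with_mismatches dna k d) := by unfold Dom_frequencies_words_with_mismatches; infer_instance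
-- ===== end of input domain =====

-- B replaces the combinations/product neighborhood enumeration by a structural suffix recursion
-- building the same neighbor groups on the string directly (objective: alternative decomposition).

-- ===== PORT A =====

-- alt_bases lookup; [] where Python raises KeyError (those inputs are outside Pre_)
def pvAltA (c : Char) : List Char :=
  if c = 'A' then ['C','G','T']
  else if c = 'C' then ['A','G','T']
  else if c = 'G' then ['A','C','T']
  else if c = 'T' then ['A','C','G'] else []

-- itertools.combinations(xs, r) in itertools' lexicographic order
def pvComb : List Nat → Nat → List (List Nat)
  | _, 0 => [[]]
  | [], _ + 1 => []
  | x :: xs, r + 1 => (pvComb xs r).map (x :: ·) ++ pvComb xs (r + 1)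

-- itertools.product(*ls) in itertools' order
def pvProd : List (List Char) → List (List Char)
  | [] => [[]]
  | l :: ls => l.flatMap fun x => (pvProd ls).map (x :: ·)

-- new_mistmatch = list(kmer); for idx, sub in zip(...): new_mistmatch[idx] = sub
def pvApplySubs (kmer : List Char) (ci : List Nat) (subs : List Char) : List Char :=
  (ci.zip subs).foldl (fun acc p => acc.set p.1 p.2) kmer

def kmer_mismatches (kmer : List Char) (d : Int) : List (List Char) :=
  (PySem.List.pyRange 1 (d + 1) 1).foldl (fun acc dist =>
      (pvComb (List.range kmer.length) dist.toNat).foldl (fun acc2 ci =>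
          acc2 ++ (pvProd (ci.map fun i => pvAltA (kmer.getD i ' '))).map (pvApplySubs kmer ci))
        acc)
    [kmer]

def frequencies_words_with_mismatches (dna : String) (k : Int) (d : Int) : List (String × Int) :=
  let dnaL := dna.toList
  ((PySem.List.pyRange 0 ((dnaL.length : Int) - k + 1) 1).foldl
      (fun (freq : PySem.Dict String Int) i =>
        let kmerL := PySem.List.slice dnaL (some i) (some (i + k))
        (kmer_mismatches kmerL d).foldl
          (fun fr m =>
            let s := String.ofList m
            if fr.contains s then fr.modify s 0 (· + 1) else fr.insert s 1)
          freq)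
      PySem.Dict.empty).items

-- ===== PORT B =====

-- _ALT[head]: dict lookup; "" where Python raises KeyError (those inputs are outside Pre_)
def pvAltB (c : Char) : List Char :=
  ((PySem.Dict.ofList [('A', "CGT"), ('C', "AGT"), ('G', "ACT"), ('T', "ACG")] :
      PySem.Dict Char String).getD c "").toList

-- _groups(kmer, dist): suffix recursion; one group per set of changed positions
def pvGroupsB : List Char → Int → List (List (List Char))
  | kmer, dist =>
    if dist = 0 then [[kmer]]
    else
      match kmer with
      | [] => []
      | c :: rest =>
          (pvGroupsB rest (dist - 1)).map (fun g => (pvAltB c).flatMap fun b => g.map (b :: ·)) ++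
          (pvGroupsB rest dist).map (fun g => g.map (c :: ·))

def frequencies_words_with_mismatches_alt (dna : String) (k : Int) (d : Int) : List (String × Int) :=
  let dnaL := dna.toList
  ((PySem.List.pyRange 0 ((dnaL.length : Int) - k + 1) 1).foldl
      (fun (counts : PySem.Dict String Int) i =>
        let kmerL := PySem.List.slice dnaL (some i) (some (i + k))
        let counts := counts.insert (String.ofList kmerL) (counts.getD (String.ofList kmerL) 0 + 1)
        (PySem.List.pyRange 1 (d + 1) 1).foldl
          (fun c2 dist =>
            (pvGroupsB kmerL dist).foldl
              (fun c3 g =>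
                g.foldl (fun c4 m => c4.insert (String.ofList m) (c4.getD (String.ofList m) 0 + 1)) c3)
              c2)
          counts)
      PySem.Dict.empty).items

-- ===== PRECONDITION & SPEC =====
-- Pre_ excludes exactly the inputs on which Python A raises KeyError: d ≥ 1 and some character
-- actually covered by a (nonempty) sliding window is outside 'ACGT' (for k ≥ 1 the windows cover
-- the whole string once len ≥ k; for k ≤ -1 they cover all but the last character once len + k ≥ 1).
def Pre_frequencies_words_with_mismatches (dna : String) (k : Int) (d : Int) : Prop :=
  d < 1 ∨
    ((1 ≤ k → ((dna.toList.length : Int) < k ∨ ∀ c ∈ dna.toList, c ∈ (['A','C','G','T'] : List Char))) ∧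
     (k ≤ -1 → ((dna.toList.length : Int) + k < 1 ∨ ∀ c ∈ dna.toList.dropLast, c ∈ (['A','C','G','T'] : List Char))))
instance (dna : String) (k : Int) (d : Int) : Decidable (Pre_frequencies_words_with_mismatches dna k d) := by
  unfold Pre_frequencies_words_with_mismatches; infer_instance

def pvWitness_frequencies_words_with_mismatches : String × Int × Int := ("ACGTA", 3, 0)

def Spec_frequencies_words_with_mismatches (dna : String) (k : Int) (d : Int) (out : List (String × Int)) : Prop := out = frequencies_words_with_mismatches_alt dna k d
instance (dna : String) (k : Int) (d : Int) (out : List (String × Int)) : Decidable (Spec_frequencies_words_with_mismatches dna k d out) := by unfold Spec_frequencies_words_with_mismatches; infer_instance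

-- ===== CLAIM (what is proved, stated in full; the proofs are below) =====
def Claim_equal_frequencies_words_with_mismatches : Prop := ∀ (dna : String) (k : Int) (d : Int), Dom_frequencies_words_with_mismatches dna k d → Pre_frequencies_words_with_mismatches dna k d → Spec_frequencies_words_with_mismatches dna k d (frequencies_words_with_mismatches dna k d)

-- ===== LEMMAS AND PROOFS =====

-- A's per-distance blocks, in clean map form: one group of neighbor strings per index combination.
def pvCombGroups (kmer : List Char) (n : Nat) : List (List (List Char)) :=
  (pvComb (List.range kmer.length) n).map
    (fun ci => (pvProd (ci.map fun i => pvAltA (kmer.getD i ' '))).map (pvApplySubs kmer ci))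

theorem pvAlt_eq (c : Char) : pvAltB c = pvAltA c := by
  by_cases h1 : c = 'A'; · subst h1; decide
  by_cases h2 : c = 'C'; · subst h2; decide
  by_cases h3 : c = 'G'; · subst h3; decide
  by_cases h4 : c = 'T'; · subst h4; decide
  unfold pvAltA pvAltB
  rw [PySem.Dict.getD_of_not_contains _ _ (by
    simp [PySem.Dict.ofList, PySem.Dict.update, PySem.Dict.contains_insert,
      PySem.Dict.contains_empty, h1, h2, h3, h4])]
  simp [h1, h2, h3, h4]

theorem pvComb_map_succ (l : List Nat) (r : Nat) :
    pvComb (l.map (· + 1)) r = (pvComb l r).map (List.map (· + 1)) := by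
  induction l generalizing r with
  | nil => cases r <;> simp [pvComb]
  | cons x xs ih =>
      cases r with
      | zero => simp [pvComb]
      | succ r => simp [pvComb, ih, List.map_map, Function.comp_def]

theorem pvApplySubs_shift (ps : List (Nat × Char)) (c : Char) (acc : List Char) :
    ps.foldl (fun a p => a.set (p.1 + 1) p.2) (c :: acc) =
      c :: ps.foldl (fun a p => a.set p.1 p.2) acc := by
  induction ps generalizing acc with
  | nil => rfl
  | cons p ps ih => simp only [List.foldl_cons, List.set_cons_succ, ih]

theorem pvApplySubs_map_succ (ci : List Nat) (subs : List Char) (c : Char) (rest : List Char) :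
    pvApplySubs (c :: rest) (ci.map (· + 1)) subs = c :: pvApplySubs rest ci subs := by
  unfold pvApplySubs
  rw [List.zip_map_left, List.foldl_map]
  exact pvApplySubs_shift (ci.zip subs) c rest

-- Core: A's combination/product groups ARE B's recursively generated groups.
theorem pvCombGroups_eq_groupsB (kmer : List Char) (n : Nat) :
    pvCombGroups kmer n = pvGroupsB kmer (n : Int) := by
  induction kmer generalizing n with
  | nil =>
      cases n with
      | zero => simp [pvCombGroups, pvComb, pvProd, pvGroupsB, pvApplySubs]
      | succ n =>
          simp only [pvCombGroups, List.length_nil, List.range_zero, pvComb, List.map_nil]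
          rw [pvGroupsB]
          rw [if_neg (by omega)]
  | cons c rest ih =>
      cases n with
      | zero => simp [pvCombGroups, pvComb, pvProd, pvGroupsB, pvApplySubs]
      | succ n =>
          rw [pvGroupsB]
          have hne : ((n : Int) + 1) ≠ 0 := by omega
          simp only [Nat.cast_add, Nat.cast_one, hne, if_false, add_sub_cancel_right]
          have hc : ((n : Int) + 1) = (((n + 1 : Nat)) : Int) := by push_cast; ring
          rw [hc, ← ih n, ← ih (n + 1)]
          unfold pvCombGroups
          simp only [List.length_cons]
          rw [List.range_succ_eq_map]
          show (pvComb (0 :: (List.range rest.length).map Nat.succ) (n + 1)).map _ = _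
      -- split the combinations into those containing index 0 and those not
          have hsucc : (List.range rest.length).map Nat.succ
              = (List.range rest.length).map (· + 1) := by
            simp
          rw [hsucc]
          simp only [pvComb, pvComb_map_succ, List.map_append, List.map_map]
          congr 1
          · -- combinations containing index 0: head substitution distributes over the group
            apply List.map_congr_left
            intro ci _
            simp only [Function.comp_def, List.map_map, List.map_cons, List.getD_cons_zero]
            have hsh : (ci.map fun x => pvAltA ((c :: rest).getD (x + 1) ' '))
                = ci.map fun i => pvAltA (rest.getD i ' ') := by simp
            rw [hsh]
            simp only [pvProd, List.map_flatMap, List.map_map, Function.comp_def]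
            rw [pvAlt_eq c]
            apply List.flatMap_congr
            intro b _
            apply List.map_congr_left
            intro subs _
            show pvApplySubs (c :: rest) (0 :: ci.map (· + 1)) (b :: subs)
                = b :: pvApplySubs rest ci subs
            unfold pvApplySubs
            simp only [List.zip_cons_cons, List.foldl_cons, List.set_cons_zero]
            rw [List.zip_map_left, List.foldl_map]
            exact pvApplySubs_shift (ci.zip subs) b rest
          · -- combinations avoiding index 0: the head character is kept on every member
            apply List.map_congr_left
            intro ci _
            simp only [Function.comp_def, List.map_map]
            have hsh : (ci.map fun x => pvAltA ((c :: rest).getD (x + 1) ' '))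
                = ci.map fun i => pvAltA (rest.getD i ' ') := by simp
            rw [hsh]
            apply List.map_congr_left
            intro subs _
            exact pvApplySubs_map_succ ci subs c rest

-- the dict update A performs per mismatch is the get-default increment B performs
theorem pvStep_eq (fr : PySem.Dict String Int) (s : String) :
    (if fr.contains s then fr.modify s 0 (· + 1) else fr.insert s 1) =
      fr.insert s (fr.getD s 0 + 1) := by
  by_cases h : fr.contains s
  · simp only [h, if_true]; rfl
  · have h' : fr.contains s = false := by simpa using h
    rw [if_neg (by simp [h']), PySem.Dict.getD_of_not_contains fr 0 h']
    norm_num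

-- per-window equality of the two dict-accumulation passes
theorem pvWindow_eq (kmerL : List Char) (d : Int) (freq : PySem.Dict String Int) :
    (kmer_mismatches kmerL d).foldl
        (fun fr m =>
          let s := String.ofList m
          if fr.contains s then fr.modify s 0 (· + 1) else fr.insert s 1) freq =
      (PySem.List.pyRange 1 (d + 1) 1).foldl
        (fun c2 dist =>
          (pvGroupsB kmerL dist).foldl
            (fun c3 g =>
              g.foldl (fun c4 m => c4.insert (String.ofList m) (c4.getD (String.ofList m) 0 + 1)) c3)
            c2)
        (freq.insert (String.ofList kmerL) (freq.getD (String.ofList kmerL) 0 + 1)) := by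
  have hstep : (fun (fr : PySem.Dict String Int) (m : List Char) =>
      let s := String.ofList m
      if fr.contains s then fr.modify s 0 (· + 1) else fr.insert s 1) =
      fun fr m => fr.insert (String.ofList m) (fr.getD (String.ofList m) 0 + 1) := by
    funext fr m; exact pvStep_eq fr (String.ofList m)
  rw [hstep]
  unfold kmer_mismatches
  -- push the dict fold through A's nested append-folds, one distance at a time
  have main : ∀ (l : List Int), (∀ x ∈ l, 1 ≤ x) → ∀ (init : List (List Char)),
      (l.foldl (fun acc dist =>
          (pvComb (List.range kmerL.length) dist.toNat).foldl (fun acc2 ci =>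
              acc2 ++ (pvProd (ci.map fun i => pvAltA (kmerL.getD i ' '))).map (pvApplySubs kmerL ci))
            acc) init).foldl
          (fun fr m => fr.insert (String.ofList m) (fr.getD (String.ofList m) 0 + 1)) freq =
      l.foldl (fun c2 dist =>
          (pvGroupsB kmerL dist).foldl
            (fun c3 g =>
              g.foldl (fun c4 m => c4.insert (String.ofList m) (c4.getD (String.ofList m) 0 + 1)) c3) c2)
        (init.foldl (fun fr m => fr.insert (String.ofList m) (fr.getD (String.ofList m) 0 + 1)) freq) := by
    intro l
    induction l generalizing freq with
    | nil => intro _ init; rfl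
    | cons dist l ih =>
        intro hmem init
        rw [List.foldl_cons, List.foldl_cons,
          ih freq (fun x hx => hmem x (List.mem_cons_of_mem _ hx))]
        congr 1
        have hblock : (pvComb (List.range kmerL.length) dist.toNat).foldl (fun acc2 ci =>
            acc2 ++ (pvProd (ci.map fun i => pvAltA (kmerL.getD i ' '))).map (pvApplySubs kmerL ci)) init
            = init ++ (pvCombGroups kmerL dist.toNat).flatten := by
          rw [PySem.List.foldl_append_eq_flatMap]
          unfold pvCombGroups
          rw [List.flatten_eq_flatMap, List.flatMap_map]
          simp only [id_eq]
        rw [hblock, List.foldl_append, ← List.foldl_flatten]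
        have hd : ((dist.toNat : Nat) : Int) = dist := by
          have := hmem dist (List.mem_cons_self)
          omega
        rw [pvCombGroups_eq_groupsB, hd]
  have := main (PySem.List.pyRange 1 (d + 1) 1)
    (fun x hx => ((PySem.List.mem_pyRange_one).1 hx).1) [kmerL]
  rw [this]
  rfl

theorem pvTotal_eq (dna : String) (k : Int) (d : Int) :
    frequencies_words_with_mismatches dna k d = frequencies_words_with_mismatches_alt dna k d := by
  unfold frequencies_words_with_mismatches frequencies_words_with_mismatches_alt
  refine congrArg PySem.Dict.items ?_
  exact List.foldl_ext _ _ _ fun freq i _ =>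
    pvWindow_eq (PySem.List.slice dna.toList (some i) (some (i + k))) d freq

-- ===== VERDICT (by name: the statement is the Claim_ definition above) =====
theorem frequencies_words_with_mismatches_spec : Claim_equal_frequencies_words_with_mismatches := by
  intro dna k d _ _
  exact pvTotal_eq dna k d
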